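-- pv_equiv track=rewrite | github.com/Kacper2901/Algorithms | test_file.py | minimum_incretment
-- ===== SOURCE A (Python) =====
-- def minimum_incretment(numbers, k):
--     length = len(numbers)
--     max_val = float("-inf")
--
--     for i in range(length):
--         if numbers[i] > max_val:
--             max_val = numbers[i]
--
--     incremets_count = 0
--
--     for i in range(length):
--         if max_val % k != numbers[i] % k:
--             return -1
--         incremets_count += (max_val - numbers[i]) // k
--
--     return incremets_count
-- ===== SOURCE B (Python) =====
-- def minimum_incretment(numbers, k):
--     count = 0
--     seen = 0
--     m = None
--     for x in numbers:
--         if m is None: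
--             m = x
--         elif x <= m:
--             if (m - x) % k != 0:
--                 return -1
--             count += (m - x) // k
--         else:
--             if (x - m) % k != 0:
--                 return -1
--             count += seen * ((x - m) // k)
--             m = x
--         seen += 1
--     return count
-- ===== Notes on version B (the rewrite author's own statement) =====
-- stated objective: alternative
-- what changed: Replace A's two staged passes (find global max, then re-scan checking mod and summing (max-x)//k) by one online pass that keeps a running max, a count of elements seen and a running answer, retroactively charging seen*(x-m)//k to all earlier elements whenever a new max appears.
import Mathlib
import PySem

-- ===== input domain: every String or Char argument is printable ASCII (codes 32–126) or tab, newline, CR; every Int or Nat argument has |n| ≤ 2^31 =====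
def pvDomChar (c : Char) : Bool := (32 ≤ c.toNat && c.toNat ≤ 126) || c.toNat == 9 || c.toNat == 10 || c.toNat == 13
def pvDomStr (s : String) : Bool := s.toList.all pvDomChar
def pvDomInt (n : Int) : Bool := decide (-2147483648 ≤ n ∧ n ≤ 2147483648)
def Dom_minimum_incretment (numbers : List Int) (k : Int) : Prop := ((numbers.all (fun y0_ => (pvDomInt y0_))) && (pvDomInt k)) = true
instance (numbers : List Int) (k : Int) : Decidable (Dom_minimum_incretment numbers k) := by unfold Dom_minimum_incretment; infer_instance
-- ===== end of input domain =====

-- B replaces A's two staged passes (global max, then re-scan with mod check and quotient sum)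
-- by a single online pass keeping a running max, a seen-count and a running answer (alternative).


-- ===== PORT A =====
-- A's first loop: `for i in range(length): if numbers[i] > max_val: ...` visits the
-- elements in order; float("-inf") is modelled as `none` (x > -inf is always true).
def pvMaxLoopA (numbers : List Int) : Option Int :=
  numbers.foldl (fun mv x =>
    match mv with
    | none => some x
    | some m => if x > m then some x else some m) none

-- A's second loop with its early `return -1`, accumulator `incremets_count = acc`.
def pvIncLoopA (max_val k acc : Int) : List Int → Int
  | [] => acc
  | n :: rest =>
    if PySem.Int.mod max_val k ≠ PySem.Int.mod n k then -1
    else pvIncLoopA max_val k (acc + PySem.Int.floordiv (max_val - n) k) rest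

def minimum_incretment (numbers : List Int) (k : Int) : Int :=
  match pvMaxLoopA numbers with
  | none => 0            -- length = 0: the second loop body never runs, returns 0
  | some m => pvIncLoopA m k 0 numbers

-- ===== PORT B =====
-- B's single loop: state (count, seen, m); m = none models Python's `m is None`.
def pvLoopB (k count seen : Int) (m : Option Int) : List Int → Int
  | [] => count
  | x :: rest =>
    match m with
    | none => pvLoopB k count (seen + 1) (some x) rest
    | some mv =>
      if x ≤ mv then
        if PySem.Int.mod (mv - x) k ≠ 0 then -1
        else pvLoopB k (count + PySem.Int.floordiv (mv - x) k) (seen + 1) (some mv) rest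
      else
        if PySem.Int.mod (x - mv) k ≠ 0 then -1
        else pvLoopB k (count + seen * PySem.Int.floordiv (x - mv) k) (seen + 1) (some x) rest

def minimum_incretment_alt (numbers : List Int) (k : Int) : Int :=
  pvLoopB k 0 0 none numbers

-- ===== PRECONDITION & SPEC =====
-- Python A raises ZeroDivisionError (at `max_val % k`) iff k = 0 and numbers is nonempty;
-- Pre_ excludes exactly those inputs.
def Pre_minimum_incretment (numbers : List Int) (k : Int) : Prop := numbers = [] ∨ k ≠ 0
instance (numbers : List Int) (k : Int) : Decidable (Pre_minimum_incretment numbers k) := by unfold Pre_minimum_incretment; infer_instance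

def pvWitness_minimum_incretment : List Int × Int := ([1, 3, 5], 2)

def Spec_minimum_incretment (numbers : List Int) (k : Int) (out : Int) : Prop := out = minimum_incretment_alt numbers k
instance (numbers : List Int) (k : Int) (out : Int) : Decidable (Spec_minimum_incretment numbers k out) := by unfold Spec_minimum_incretment; infer_instance

-- ===== CLAIM (what is proved, stated in full; the proofs are below) =====
def Claim_equal_minimum_incretment : Prop := ∀ (numbers : List Int) (k : Int), Dom_minimum_incretment numbers k → Pre_minimum_incretment numbers k → Spec_minimum_incretment numbers k (minimum_incretment numbers k)

-- ===== LEMMAS AND PROOFS =====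

-- Sum of per-element quotients against a fixed maximum m.
def pvSumF (m k : Int) (xs : List Int) : Int :=
  (xs.map (fun y => PySem.Int.floordiv (m - y) k)).sum

-- A's running max equals List.foldl max.
theorem pvMaxLoopA_cons (x : Int) (t : List Int) :
    pvMaxLoopA (x :: t) = some (t.foldl max x) := by
  show List.foldl _ (some x) t = _
  induction t generalizing x with
  | nil => rfl
  | cons y r ih =>
      simp only [List.foldl_cons]
      rw [show (if y > x then some y else some x) = some (max x y) by
            rcases le_or_gt y x with h | h
            · simp [max_eq_left h, not_lt.mpr h]
            · simp [max_eq_right (le_of_lt h), h]]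
      exact ih (max x y)

-- Python's `%` agreement is exactly divisibility of the difference (k ≠ 0).
theorem pvModEq_pos (k m n : Int) (hk : 0 < k) :
    PySem.Int.mod m k = PySem.Int.mod n k ↔ k ∣ (m - n) := by
  rw [PySem.Int.mod_eq_emod_of_pos hk, PySem.Int.mod_eq_emod_of_pos hk,
    Int.emod_eq_emod_iff_emod_sub_eq_zero]
  exact ⟨Int.dvd_of_emod_eq_zero, Int.emod_eq_zero_of_dvd⟩

theorem pvModEq (k m n : Int) (hk : k ≠ 0) :
    PySem.Int.mod m k = PySem.Int.mod n k ↔ k ∣ (m - n) := by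
  rcases lt_trichotomy k 0 with h | h | h
  · have h1 : PySem.Int.mod m k = -PySem.Int.mod (-m) (-k) := by
      rw [← PySem.Int.mod_neg_neg (-m) (-k)]; simp
    have h2 : PySem.Int.mod n k = -PySem.Int.mod (-n) (-k) := by
      rw [← PySem.Int.mod_neg_neg (-n) (-k)]; simp
    rw [h1, h2, neg_inj, pvModEq_pos (-k) (-m) (-n) (by omega),
      show (-m - -n) = -(m - n) by ring, neg_dvd, dvd_neg]
  · exact absurd h hk
  · exact pvModEq_pos k m n h

-- Exact floor division: if k ∣ a then floordiv a k * k = a.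
theorem pvFloordivExact (a k : Int) (hdvd : k ∣ a) :
    PySem.Int.floordiv a k * k = a := by
  have h0 : PySem.Int.mod a k = 0 := (PySem.Int.mod_eq_zero_iff_dvd a k).mpr hdvd
  have := PySem.Int.floordiv_mul_add_mod a k
  omega

-- Floor division is additive on exact multiples.
theorem pvFloordivAdd (a b k : Int) (hk : k ≠ 0) (ha : k ∣ a) (hb : k ∣ b) :
    PySem.Int.floordiv (a + b) k = PySem.Int.floordiv a k + PySem.Int.floordiv b k := by
  have h1 := pvFloordivExact a k ha
  have h2 := pvFloordivExact b k hb
  have h3 := pvFloordivExact (a + b) k (dvd_add ha hb)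
  have : PySem.Int.floordiv (a + b) k * k =
      (PySem.Int.floordiv a k + PySem.Int.floordiv b k) * k := by
    rw [add_mul]; omega
  exact mul_right_cancel₀ hk this

theorem pvFloordivZero (k : Int) : PySem.Int.floordiv 0 k = 0 := by
  simp [PySem.Int.floordiv, Int.zero_fdiv]

-- The running max stays congruent to the base modulo k.
theorem pvDvdFoldlMax (k : Int) (r : List Int) (m : Int)
    (h : ∀ y ∈ r, k ∣ (y - m)) : k ∣ (r.foldl max m - m) := by
  induction r generalizing m with
  | nil => simp
  | cons y t ih =>
      have hy := h y List.mem_cons_self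
      have hmax : k ∣ (max m y - m) := by
        rcases max_choice m y with hc | hc <;> rw [hc]
        · simp
        · exact hy
      have ht : ∀ z ∈ t, k ∣ (z - max m y) := by
        intro z hz
        have := h z (List.mem_cons_of_mem _ hz)
        have : k ∣ ((z - m) - (max m y - m)) := dvd_sub this hmax
        simpa using this
      have hrec := ih (max m y) ht
      have : k ∣ (List.foldl max (max m y) t - max m y + (max m y - m)) :=
        dvd_add hrec hmax
      simpa [List.foldl_cons] using this

-- A's accumulation loop, good case: all compatible ⇒ plain quotient sum.
theorem pvIncLoopA_run (m k : Int) (xs : List Int) (acc : Int)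
    (h : ∀ n ∈ xs, PySem.Int.mod m k = PySem.Int.mod n k) :
    pvIncLoopA m k acc xs = acc + pvSumF m k xs := by
  induction xs generalizing acc with
  | nil => simp [pvIncLoopA, pvSumF]
  | cons n r ih =>
      have hn := h n List.mem_cons_self
      simp only [pvIncLoopA, if_neg (not_not.mpr hn)]
      rw [ih _ (fun y hy => h y (List.mem_cons_of_mem _ hy))]
      simp [pvSumF]; ring

-- A's accumulation loop, bad case: some element incompatible ⇒ -1.
theorem pvIncLoopA_bad (m k : Int) (xs : List Int) (acc : Int)
    (h : ∃ n ∈ xs, PySem.Int.mod m k ≠ PySem.Int.mod n k) :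
    pvIncLoopA m k acc xs = -1 := by
  induction xs generalizing acc with
  | nil => simp at h
  | cons n r ih =>
      by_cases hc : PySem.Int.mod m k ≠ PySem.Int.mod n k
      · simp [pvIncLoopA, hc]
      · rcases h with ⟨y, hy, hyne⟩
        rcases List.mem_cons.mp hy with rfl | hyr
        · exact absurd hyne hc
        · simp only [pvIncLoopA, if_neg hc]
          exact ih _ ⟨y, hyr, hyne⟩

-- B's loop, good case: closed characterisation via the suffix maximum.
theorem pvLoopB_good (k : Int) (hk : k ≠ 0) (xs : List Int) (c n m : Int)
    (h : ∀ y ∈ xs, k ∣ (y - m)) :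
    pvLoopB k c n (some m) xs
      = c + n * PySem.Int.floordiv (xs.foldl max m - m) k + pvSumF (xs.foldl max m) k xs := by
  induction xs generalizing c n m with
  | nil => simp [pvLoopB, pvSumF, pvFloordivZero]
  | cons x r ih =>
      have hx : k ∣ (x - m) := h x List.mem_cons_self
      have hr : ∀ y ∈ r, k ∣ (y - m) := fun y hy => h y (List.mem_cons_of_mem _ hy)
      by_cases hle : x ≤ m
      · have hmod : ¬ PySem.Int.mod (m - x) k ≠ 0 := by
          have : k ∣ (m - x) := by simpa using hx.neg_right
          simp [(PySem.Int.mod_eq_zero_iff_dvd _ _).mpr this]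
        have hfold : (x :: r).foldl max m = r.foldl max m := by
          simp [List.foldl_cons, max_eq_left hle]
        simp only [pvLoopB, if_pos hle, if_neg hmod]
        rw [ih _ _ _ hr, hfold]
        have hdM : k ∣ (r.foldl max m - m) := pvDvdFoldlMax k r m hr
        have hdx : k ∣ (m - x) := by simpa using hx.neg_right
        have hsum : PySem.Int.floordiv (r.foldl max m - x) k
            = PySem.Int.floordiv (r.foldl max m - m) k + PySem.Int.floordiv (m - x) k := by
          rw [← pvFloordivAdd _ _ _ hk hdM hdx]; ring_nf
        simp only [pvSumF, List.map_cons, List.sum_cons, hsum]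
        ring
      · have hgt : ¬ x ≤ m := hle
        have hmod : ¬ PySem.Int.mod (x - m) k ≠ 0 := by
          simp [(PySem.Int.mod_eq_zero_iff_dvd _ _).mpr hx]
        have hr' : ∀ y ∈ r, k ∣ (y - x) := by
          intro y hy
          have := dvd_sub (hr y hy) hx
          simpa using this
        have hfold : (x :: r).foldl max m = r.foldl max x := by
          simp [List.foldl_cons, max_eq_right (le_of_not_ge hgt)]
        simp only [pvLoopB, if_neg hgt, if_neg hmod]
        rw [ih _ _ _ hr', hfold]
        have hdM : k ∣ (r.foldl max x - x) := pvDvdFoldlMax k r x hr'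
        have hMm : PySem.Int.floordiv (r.foldl max x - m) k
            = PySem.Int.floordiv (r.foldl max x - x) k + PySem.Int.floordiv (x - m) k := by
          rw [← pvFloordivAdd _ _ _ hk hdM hx]; ring_nf
        simp only [pvSumF, List.map_cons, List.sum_cons, hMm]
        ring

-- B's loop, bad case: some element incongruent to the running max ⇒ -1.
theorem pvLoopB_bad (k : Int) (xs : List Int) (c n m : Int)
    (h : ∃ y ∈ xs, ¬ k ∣ (y - m)) :
    pvLoopB k c n (some m) xs = -1 := by
  induction xs generalizing c n m with
  | nil => simp at h
  | cons x r ih =>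
      by_cases hx : k ∣ (x - m)
      · rcases h with ⟨y, hy, hynd⟩
        have hyr : y ∈ r := by
          rcases List.mem_cons.mp hy with rfl | hyr
          · exact absurd hx hynd
          · exact hyr
        by_cases hle : x ≤ m
        · have hmod : ¬ PySem.Int.mod (m - x) k ≠ 0 := by
            have : k ∣ (m - x) := by simpa using hx.neg_right
            simp [(PySem.Int.mod_eq_zero_iff_dvd _ _).mpr this]
          simp only [pvLoopB, if_pos hle, if_neg hmod]
          exact ih _ _ _ ⟨y, hyr, hynd⟩
        · have hmod : ¬ PySem.Int.mod (x - m) k ≠ 0 := by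
            simp [(PySem.Int.mod_eq_zero_iff_dvd _ _).mpr hx]
          simp only [pvLoopB, if_neg hle, if_neg hmod]
          refine ih _ _ _ ⟨y, hyr, fun hd => hynd ?_⟩
          have := dvd_add hd hx
          simpa using this
      · by_cases hle : x ≤ m
        · have hmod : PySem.Int.mod (m - x) k ≠ 0 := by
            intro h0
            exact hx (by simpa using ((PySem.Int.mod_eq_zero_iff_dvd _ _).mp h0).neg_right)
          simp [pvLoopB, hle, hmod]
        · have hmod : PySem.Int.mod (x - m) k ≠ 0 := by
            intro h0
            exact hx ((PySem.Int.mod_eq_zero_iff_dvd _ _).mp h0)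
          simp [pvLoopB, hle, hmod]

-- ===== VERDICT (by name: the statement is the Claim_ definition above) =====
theorem minimum_incretment_spec : Claim_equal_minimum_incretment := by
  intro numbers k _ hpre
  unfold Spec_minimum_incretment
  cases numbers with
  | nil => rfl
  | cons x t =>
      have hk : k ≠ 0 := by
        rcases hpre with h | h
        · exact absurd h (by simp)
        · exact h
      set M := t.foldl max x with hM
      have hA : minimum_incretment (x :: t) k = pvIncLoopA M k 0 (x :: t) := by
        simp [minimum_incretment, pvMaxLoopA_cons, hM]
      have hB : minimum_incretment_alt (x :: t) k = pvLoopB k 0 1 (some x) t := by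
        simp [minimum_incretment_alt, pvLoopB]
      rw [hA, hB]
      by_cases hb : ∃ y ∈ t, ¬ k ∣ (y - x)
      · rw [pvLoopB_bad k t 0 1 x hb]
        rcases hb with ⟨y, hy, hynd⟩
        by_cases hMx : k ∣ (M - x)
        · have hMy : ¬ k ∣ (M - y) := by
            intro hd
            exact hynd (by simpa using dvd_sub hMx hd)
          exact pvIncLoopA_bad M k (x :: t) 0
            ⟨y, List.mem_cons_of_mem _ hy, fun hmod => hMy ((pvModEq k M y hk).mp hmod)⟩
        · exact pvIncLoopA_bad M k (x :: t) 0
            ⟨x, List.mem_cons_self, fun hmod => hMx ((pvModEq k M x hk).mp hmod)⟩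
      · have hall : ∀ y ∈ t, k ∣ (y - x) := fun y hy =>
          not_not.mp (fun hd => hb ⟨y, hy, hd⟩)
        have hMx : k ∣ (M - x) := by rw [hM]; exact pvDvdFoldlMax k t x hall
        have hgood : ∀ n ∈ x :: t, PySem.Int.mod M k = PySem.Int.mod n k := by
          intro n hn
          refine (pvModEq k M n hk).mpr ?_
          rcases List.mem_cons.mp hn with rfl | hnt
          · exact hMx
          · have := dvd_sub hMx (hall n hnt)
            simpa using this
        rw [pvIncLoopA_run M k (x :: t) 0 hgood,
          pvLoopB_good k hk t 0 1 x hall, ← hM]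
        simp only [pvSumF, List.map_cons, List.sum_cons]
        ring
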